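-- pv_equiv track=rewrite | github.com/ndlongvn/BioRED-NER-RE | RE BioRED/function.py | convert_raw_text
-- ===== SOURCE A (Python) =====
-- from typing import Dict, List, Optional
--
-- def convert_raw_text(text:str, list_en1: List[str], list_en2: List[str]):
--     """
--     Input:
--         text: raw text
--         list_en1: list of entity1
--         list_en2: list of entity2
--     Output:
--         new_text: add special token for entity
--
--     """
--     list_en= list_en1+ list_en2
--     list_en= sorted(list_en, key= lambda x: x[0])
--     new_text= ''
--     begin= 0
--     for i in list_en:
--         # (start, end, type, ent_text)
--         assert text[i[0]:i[1]] == i[3], 'start and end of entity is not correct'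
--         new_text+= text[begin:i[0]]
--         new_text+= '@'+i[2]+'$'+' '+ i[3]+' '+'@/'+i[2]+'$'
--         begin= i[1]
--     new_text+= text[begin:]
--     return new_text
-- ===== SOURCE B (Python) =====
-- def convert_raw_text(text, list_en1, list_en2):
--     """Validate all entity spans up front, then build the marked-up text by a
--     single recursion that constructs the result suffix-first (no cursor state,
--     no string accumulator)."""
--     list_en = sorted(list_en1 + list_en2, key=lambda e: e[0])
--     for s, e, t, x in list_en:
--         assert text[s:e] == x, 'start and end of entity is not correct'
--
--     def emit(prev_end, rest):
--         if not rest: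
--             return text[prev_end:]
--         s, e, t, x = rest[0]
--         return text[prev_end:s] + '@' + t + '$ ' + x + ' @/' + t + '$' + emit(e, rest[1:])
--
--     return emit(0, list_en)
-- ===== Notes on version B (the rewrite author's own statement) =====
-- stated objective: alternative
-- what changed: The interleaved assert/cursor/accumulator loop is replaced by a separate up-front validation pass plus a recursion that builds the result suffix-first from the entity list, carrying only the previous end position and no accumulated string.
import Mathlib
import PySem

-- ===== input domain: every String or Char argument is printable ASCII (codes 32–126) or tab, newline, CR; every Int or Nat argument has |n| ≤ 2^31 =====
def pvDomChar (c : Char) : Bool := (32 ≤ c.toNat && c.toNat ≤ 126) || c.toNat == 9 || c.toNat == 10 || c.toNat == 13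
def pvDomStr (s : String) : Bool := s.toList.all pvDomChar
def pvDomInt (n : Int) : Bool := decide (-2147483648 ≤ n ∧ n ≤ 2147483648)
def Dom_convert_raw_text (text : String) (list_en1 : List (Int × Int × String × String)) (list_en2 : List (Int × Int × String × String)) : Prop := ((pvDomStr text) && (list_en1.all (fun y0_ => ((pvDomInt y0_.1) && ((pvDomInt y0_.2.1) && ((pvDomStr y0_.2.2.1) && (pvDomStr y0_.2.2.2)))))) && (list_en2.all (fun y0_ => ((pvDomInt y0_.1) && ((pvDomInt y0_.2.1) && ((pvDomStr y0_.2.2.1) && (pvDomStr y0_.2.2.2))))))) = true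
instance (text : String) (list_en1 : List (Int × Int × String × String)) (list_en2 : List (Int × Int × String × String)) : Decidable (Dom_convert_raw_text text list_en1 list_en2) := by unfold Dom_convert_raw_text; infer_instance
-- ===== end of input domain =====

-- B replaces A's interleaved assert/cursor/accumulator loop by an up-front validation
-- pass plus a suffix-first recursion over the entity list (objective: alternative).


-- ===== PORT A =====
-- markup token string of A: '@'+t+'$'+' '+x+' '+'@/'+t+'$'  (on code points)
def pvMarkA (i : Int × Int × String × String) : List Char :=
  ['@'] ++ i.2.2.1.toList ++ ['$'] ++ [' '] ++ i.2.2.2.toList ++ [' '] ++ ['@', '/'] ++ i.2.2.1.toList ++ ['$']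

-- A's loop body: new_text += text[begin:i[0]]; new_text += markup; begin = i[1]
-- (the assert is a no-op on inputs admitted by Pre_, which excludes AssertionError)
def convert_raw_text (text : String) (list_en1 : List (Int × Int × String × String)) (list_en2 : List (Int × Int × String × String)) : String :=
  let list_en := list_en1 ++ list_en2
  let list_en := PySem.List.sorted list_en (fun i => i.1) false
  let st := list_en.foldl
    (fun (st : List Char × Int) i =>
      (st.1 ++ PySem.Chars.slice text.toList (some st.2) (some i.1) ++ pvMarkA i, i.2.1))
    ([], 0)
  String.ofList (st.1 ++ PySem.Chars.slice text.toList (some st.2) none)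

-- ===== PORT B =====
-- markup token string of B: '@'+t+'$ '+x+' @/'+t+'$'
def pvMarkB (i : Int × Int × String × String) : List Char :=
  ['@'] ++ i.2.2.1.toList ++ ['$', ' '] ++ i.2.2.2.toList ++ [' ', '@', '/'] ++ i.2.2.1.toList ++ ['$']

-- B's emit: suffix-first recursion carrying only the previous end position
def pvEmitB (text : List Char) (prev_end : Int) : List (Int × Int × String × String) → List Char
  | [] => PySem.Chars.slice text (some prev_end) none
  | i :: rest =>
      PySem.Chars.slice text (some prev_end) (some i.1) ++ pvMarkB i ++ pvEmitB text i.2.1 rest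

-- (B's up-front validation pass is a no-op on inputs admitted by Pre_)
def convert_raw_text_alt (text : String) (list_en1 : List (Int × Int × String × String)) (list_en2 : List (Int × Int × String × String)) : String :=
  let list_en := PySem.List.sorted (list_en1 ++ list_en2) (fun i => i.1) false
  String.ofList (pvEmitB text.toList 0 list_en)

-- ===== PRECONDITION & SPEC =====
-- Pre_ excludes exactly the inputs where the assert fires (text[s:e] != ent_text for
-- some entity), on which Python A raises AssertionError (and B raises too).
def Pre_convert_raw_text (text : String) (list_en1 : List (Int × Int × String × String)) (list_en2 : List (Int × Int × String × String)) : Prop :=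
  ((list_en1 ++ list_en2).all
    (fun i => PySem.Chars.slice text.toList (some i.1) (some i.2.1) == i.2.2.2.toList)) = true
instance (text : String) (list_en1 : List (Int × Int × String × String)) (list_en2 : List (Int × Int × String × String)) : Decidable (Pre_convert_raw_text text list_en1 list_en2) := by unfold Pre_convert_raw_text; infer_instance

def pvWitness_convert_raw_text : String × (List (Int × Int × String × String)) × (List (Int × Int × String × String)) :=
  ("ab cd", [(0, 2, "Gene", "ab")], [(3, 5, "Disease", "cd")])

def Spec_convert_raw_text (text : String) (list_en1 : List (Int × Int × String × String)) (list_en2 : List (Int × Int × String × String)) (out : String) : Prop := out = convert_raw_text_alt text list_en1 list_en2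
instance (text : String) (list_en1 : List (Int × Int × String × String)) (list_en2 : List (Int × Int × String × String)) (out : String) : Decidable (Spec_convert_raw_text text list_en1 list_en2 out) := by unfold Spec_convert_raw_text; infer_instance

-- ===== CLAIM (what is proved, stated in full; the proofs are below) =====
def Claim_equal_convert_raw_text : Prop := ∀ (text : String) (list_en1 : List (Int × Int × String × String)) (list_en2 : List (Int × Int × String × String)), Dom_convert_raw_text text list_en1 list_en2 → Pre_convert_raw_text text list_en1 list_en2 → Spec_convert_raw_text text list_en1 list_en2 (convert_raw_text text list_en1 list_en2)

-- ===== LEMMAS AND PROOFS =====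

theorem pvMark_eq (i : Int × Int × String × String) : pvMarkA i = pvMarkB i := by
  simp [pvMarkA, pvMarkB]

-- A's fold followed by the tail slice produces exactly B's suffix-first recursion
theorem pvFold_eq_emit (text : List Char) (l : List (Int × Int × String × String))
    (acc : List Char) (b : Int) :
    (l.foldl
        (fun (st : List Char × Int) i =>
          (st.1 ++ PySem.Chars.slice text (some st.2) (some i.1) ++ pvMarkA i, i.2.1))
        (acc, b)).1 ++
      PySem.Chars.slice text
        (some (l.foldl
          (fun (st : List Char × Int) i =>
            (st.1 ++ PySem.Chars.slice text (some st.2) (some i.1) ++ pvMarkA i, i.2.1))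
          (acc, b)).2) none
      = acc ++ pvEmitB text b l := by
  induction l generalizing acc b with
  | nil => simp [pvEmitB]
  | cons i rest ih =>
      simp only [List.foldl_cons, pvEmitB]
      rw [ih]
      simp [pvMark_eq]

theorem convert_raw_text_eq (text : String) (list_en1 list_en2 : List (Int × Int × String × String)) :
    convert_raw_text text list_en1 list_en2 = convert_raw_text_alt text list_en1 list_en2 := by
  simp only [convert_raw_text, convert_raw_text_alt]
  exact congrArg String.ofList (pvFold_eq_emit text.toList _ [] 0)

-- ===== VERDICT (by name: the statement is the Claim_ definition above) =====
theorem convert_raw_text_spec : Claim_equal_convert_raw_text := by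
  intro text l1 l2 _ _
  unfold Spec_convert_raw_text
  exact convert_raw_text_eq text l1 l2
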